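-- pv_equiv track=rewrite | github.com/Anonatormachine/Practic8 | V10_2.py | sort_columns
-- ===== SOURCE A (Python) =====
-- def sort_columns(matrix, k):
--     sorted_columns = sorted(range(len(matrix[0])), key=lambda i: matrix[k - 1][i]) # Получаем индексы столбцов, отсортированных по элементам k-й строки
--
--     sorted_matrix = [] # Создаем новую матрицу с отсортированными столбцами
--     for row in range(len(matrix)):
--         new_row = [] # Создаем новую строку массива
--         for col in sorted_columns:
--             new_row.append(matrix[row][col]) # Заполняем новую строку элементами из отсортированных столбцов
--
--         sorted_matrix.append(new_row)
--
--     return sorted_matrix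
-- ===== SOURCE B (Python) =====
-- def sort_columns(matrix, k):
--     # Incrementally build the answer: keep a list of (key, column) pairs sorted
--     # by key, inserting each column of the matrix before the first strictly
--     # greater key (stable insertion sort over whole column vectors).
--     cols = []
--     for i in range(len(matrix[0])):
--         column = [row[i] for row in matrix]
--         entry = (matrix[k - 1][i], column)
--         j = 0
--         while j < len(cols) and cols[j][0] <= entry[0]:
--             j += 1
--         cols.insert(j, entry)
--     return [[col[r] for _, col in cols] for r in range(len(matrix))]
-- ===== Notes on version B (the rewrite author's own statement) =====
-- stated objective: alternative
-- what changed: Instead of one sorted() call on an index permutation followed by a rebuild with double indexing, B performs an incremental stable insertion sort: it maintains a list of (key, column-vector) pairs kept sorted by key, inserting each column before the first strictly greater key, and then reads the rows back off the sorted column list.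
import Mathlib
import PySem

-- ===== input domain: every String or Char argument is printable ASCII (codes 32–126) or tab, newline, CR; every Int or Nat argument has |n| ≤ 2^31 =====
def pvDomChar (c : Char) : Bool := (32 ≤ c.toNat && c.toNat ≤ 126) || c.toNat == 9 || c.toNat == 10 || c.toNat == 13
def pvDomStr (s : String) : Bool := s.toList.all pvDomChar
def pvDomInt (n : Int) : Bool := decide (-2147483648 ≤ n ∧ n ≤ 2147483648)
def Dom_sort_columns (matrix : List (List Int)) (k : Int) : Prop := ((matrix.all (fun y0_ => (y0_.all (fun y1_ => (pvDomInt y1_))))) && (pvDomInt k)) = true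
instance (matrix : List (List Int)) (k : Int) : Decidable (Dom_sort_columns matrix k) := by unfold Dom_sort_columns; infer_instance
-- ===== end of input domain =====

-- B replaces A's sorted()-on-an-index-permutation by an incremental stable insertion
-- sort that maintains a sorted list of (key, column-vector) pairs (objective: alternative).

-- ===== PORT A =====
def sort_columns (matrix : List (List Int)) (k : Int) : List (List Int) :=
  -- sorted_columns = sorted(range(len(matrix[0])), key=lambda i: matrix[k-1][i])
  let sortedCols : List Int :=
    PySem.List.sorted (PySem.List.pyRange 0 ((PySem.List.pyGetD matrix 0 []).length) 1)
      (fun i => PySem.List.pyGetD (PySem.List.pyGetD matrix (k - 1) []) i 0)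
  -- for row in range(len(matrix)): new_row = []; for col in sorted_columns: new_row.append(...)
  (PySem.List.pyRange 0 (matrix.length) 1).foldl
    (fun sm r =>
      sm ++ [sortedCols.foldl
              (fun nr c => nr ++ [PySem.List.pyGetD (PySem.List.pyGetD matrix r []) c 0]) []])
    []

-- ===== PORT B =====
-- the inner while loop + cols.insert(j, entry): walk past entries with key ≤ entry's key,
-- insert before the first strictly greater key (stable)
def pvColsInsert (entry : Int × List Int) : List (Int × List Int) → List (Int × List Int)
  | [] => [entry]
  | c :: t => if c.1 ≤ entry.1 then c :: pvColsInsert entry t else entry :: c :: t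

def sort_columns_alt (matrix : List (List Int)) (k : Int) : List (List Int) :=
  -- for i in range(len(matrix[0])): column = [row[i] for row in matrix]; insert (key, column)
  let cols : List (Int × List Int) :=
    (PySem.List.pyRange 0 ((PySem.List.pyGetD matrix 0 []).length) 1).foldl
      (fun cols i =>
        pvColsInsert
          (PySem.List.pyGetD (PySem.List.pyGetD matrix (k - 1) []) i 0,
           matrix.map (fun row => PySem.List.pyGetD row i 0)) cols)
      []
  -- [[col[r] for _, col in cols] for r in range(len(matrix))]
  (List.range matrix.length).map
    (fun r => cols.map (fun c => PySem.List.pyGetD c.2 (Int.ofNat r) 0))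

-- ===== PRECONDITION & SPEC =====
-- Exactly the inputs on which A returns normally: a nonempty matrix whose rows are all at
-- least as long as row 0 (else IndexError on matrix[row][col] / the sort key), and, when
-- row 0 is nonempty, a k with matrix[k-1] a valid (possibly negative) Python index.
def Pre_sort_columns (matrix : List (List Int)) (k : Int) : Prop :=
  matrix ≠ [] ∧ (∀ row ∈ matrix, (matrix.headD []).length ≤ row.length) ∧
    ((matrix.headD []).length = 0 ∨ (-(matrix.length : Int) ≤ k - 1 ∧ k - 1 < matrix.length))
instance (matrix : List (List Int)) (k : Int) : Decidable (Pre_sort_columns matrix k) := by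
  unfold Pre_sort_columns; infer_instance

def pvWitness_sort_columns : List (List Int) × Int := ([[3, 1, 2], [7, 8, 9]], 1)

def Spec_sort_columns (matrix : List (List Int)) (k : Int) (out : List (List Int)) : Prop := out = sort_columns_alt matrix k
instance (matrix : List (List Int)) (k : Int) (out : List (List Int)) : Decidable (Spec_sort_columns matrix k out) := by unfold Spec_sort_columns; infer_instance

-- ===== CLAIM (what is proved, stated in full; the proofs are below) =====
def Claim_equal_sort_columns : Prop := ∀ (matrix : List (List Int)) (k : Int), Dom_sort_columns matrix k → Pre_sort_columns matrix k → Spec_sort_columns matrix k (sort_columns matrix k)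

-- ===== LEMMAS AND PROOFS =====

-- B's insertion (skip while key ≤, insert before the first strictly greater key) is
-- exactly insertBy with the complementary test, on every list
theorem pv_colsInsert_eq_insertBy (e : Int × List Int) (l : List (Int × List Int)) :
    pvColsInsert e l = PySem.List.insertBy (fun a b => decide (a.1 < b.1)) e l := by
  induction l with
  | nil => rfl
  | cons c t ih =>
    simp only [pvColsInsert, PySem.List.insertBy]
    by_cases h : c.1 ≤ e.1
    · rw [if_pos h, if_neg (by simpa using h), ih]
    · rw [if_neg h, if_pos (by simpa using lt_of_not_ge h)]

-- insertBy commutes with map when the comparison factors through the map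
theorem pv_insertBy_map {α β : Type} (p : β → β → Bool) (h : α → β) (x : α) (ys : List α) :
    PySem.List.insertBy p (h x) (ys.map h)
      = (PySem.List.insertBy (fun a b => p (h a) (h b)) x ys).map h := by
  induction ys with
  | nil => rfl
  | cons y t ih => simp only [List.map, PySem.List.insertBy]; split_ifs <;> simp [ih]

-- stable sort of a mapped list = map of the stable sort under the composed key
theorem pv_sorted_map {α β κ : Type} [LT κ] [DecidableLT κ] (h : α → β) (key : β → κ)
    (l : List α) :
    PySem.List.sorted (l.map h) key = (PySem.List.sorted l (fun x => key (h x))).map h := by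
  rw [PySem.List.sorted_eq_foldl_insertBy, PySem.List.sorted_eq_foldl_insertBy]
  induction l using List.reverseRecOn with
  | nil => rfl
  | append_singleton t x ih =>
    simp only [List.map_append, List.foldl_append, ih, List.map_cons, List.map_nil,
      List.foldl_cons, List.foldl_nil]
    exact pv_insertBy_map _ h x _

-- B's insertion loop over the range = sorted() of the (key, column) pairs by key
theorem pv_cols_eq_sorted (matrix : List (List Int)) (k : Int) (idx : List Int) :
    idx.foldl
      (fun cols i =>
        pvColsInsert
          (PySem.List.pyGetD (PySem.List.pyGetD matrix (k - 1) []) i 0,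
           matrix.map (fun row => PySem.List.pyGetD row i 0)) cols)
      []
    = PySem.List.sorted
        (idx.map (fun i =>
          (PySem.List.pyGetD (PySem.List.pyGetD matrix (k - 1) []) i 0,
           matrix.map (fun row => PySem.List.pyGetD row i 0))))
        (fun c => c.1) := by
  rw [PySem.List.sorted_eq_foldl_insertBy, List.foldl_map]
  simp only [pv_colsInsert_eq_insertBy]

-- ===== VERDICT (by name: the statement is the Claim_ definition above) =====
theorem sort_columns_spec : Claim_equal_sort_columns := by
  intro matrix k _hdom _hpre
  simp only [Spec_sort_columns, sort_columns, sort_columns_alt]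
  rw [pv_cols_eq_sorted]
  rw [pv_sorted_map (fun i : Int =>
        (PySem.List.pyGetD (PySem.List.pyGetD matrix (k - 1) []) i 0,
         matrix.map (fun row => PySem.List.pyGetD row i 0))) (fun c => c.1)]
  rw [PySem.List.pyRange_one 0 (matrix.length : Int)]
  simp only [zero_add, Int.sub_zero, Int.toNat_natCast]
  rw [List.foldl_map, PySem.List.foldl_append_singleton_eq_map]
  simp only [List.nil_append]
  apply List.map_congr_left
  intro r hr0
  have hr : r < matrix.length := List.mem_range.mp hr0
  rw [PySem.List.foldl_append_singleton_eq_map]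
  simp only [List.nil_append, List.map_map]
  apply List.map_congr_left
  intro i _
  simp only [Function.comp, Int.ofNat_eq_natCast, PySem.List.pyGetD_natCast]
  simp [List.getD_eq_getElem?_getD, List.getElem?_eq_getElem hr]
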